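-- pv_equiv track=rewrite | github.com/Vedanjalee/Py_CODE | 17jan/Repalce_with_ranks.py | replace_with_ranks
-- ===== SOURCE A (Python) =====
-- def replace_with_ranks(arr):
--
--     sorted_unique = sorted(set(arr))
--
--     rank_map = {}
--     rank = 1
--     for value in sorted_unique:
--         rank_map[value] = rank
--         rank += 1
--
--
--     ranked_array = []
--     for element in arr:
--         ranked_array.append(rank_map[element])
--
--     return ranked_array
-- ===== SOURCE B (Python) =====
-- def replace_with_ranks(arr):
--     distinct = sorted(set(arr))
--     out = []
--     for x in arr:
--         lo, hi = 0, len(distinct)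
--         while lo < hi:
--             mid = (lo + hi) // 2
--             if distinct[mid] < x:
--                 lo = mid + 1
--             else:
--                 hi = mid
--         out.append(lo + 1)
--     return out
-- ===== Notes on version B (the rewrite author's own statement) =====
-- stated objective: alternative
-- what changed: Replaces A's rank dictionary (built by a counter loop over the sorted distinct values and then looked up per element) with a per-element binary search over the sorted distinct values: no dict is ever built, the rank is 1 + the bisect-left position.
import Mathlib
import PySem

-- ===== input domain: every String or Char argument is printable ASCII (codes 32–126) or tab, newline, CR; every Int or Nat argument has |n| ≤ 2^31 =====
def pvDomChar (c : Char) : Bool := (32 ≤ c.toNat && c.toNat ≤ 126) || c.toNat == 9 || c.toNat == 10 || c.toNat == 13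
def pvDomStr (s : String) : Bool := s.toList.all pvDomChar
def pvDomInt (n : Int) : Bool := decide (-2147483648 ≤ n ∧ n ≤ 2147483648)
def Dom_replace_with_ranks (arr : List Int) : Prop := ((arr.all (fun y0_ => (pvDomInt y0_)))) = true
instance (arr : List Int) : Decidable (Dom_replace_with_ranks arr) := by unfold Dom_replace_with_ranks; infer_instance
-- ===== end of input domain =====

-- B replaces A's rank dictionary with a per-element binary search over the sorted distinct
-- values (alternative decomposition, same asymptotic cost); return values agree on all inputs.

-- ===== PORT A =====
-- Python's rank_map[element] would raise KeyError only for a key not in the map; every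
-- element of arr is a key of rank_map, so the getD default 0 is never read.
def replace_with_ranks (arr : List Int) : List Int :=
  let sorted_unique := PySem.List.sorted (PySem.Set.ofList arr) (fun x => x) false
  let st := sorted_unique.foldl
    (fun (st : PySem.Dict Int Int × Int) v => (st.1.insert v st.2, st.2 + 1))
    (PySem.Dict.empty, 1)
  arr.foldl (fun acc e => acc ++ [st.1.getD e 0]) []

-- ===== PORT B =====
-- the while-loop of Source B; distinct[mid] is always in range (0 ≤ lo ≤ mid < hi ≤ len),
-- so the pyGetD default 0 is never read.
def bsearchLt (distinct : List Int) (x lo hi : Int) : Int :=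
  if h : lo < hi then
    let mid := PySem.Int.floordiv (lo + hi) 2
    if PySem.List.pyGetD distinct mid 0 < x then bsearchLt distinct x (mid + 1) hi
    else bsearchLt distinct x lo mid
  else lo
termination_by (hi - lo).toNat
decreasing_by
  · have h1 : lo * 2 ≤ lo + hi := by omega
    have h2 : lo + hi < hi * 2 := by omega
    have := (PySem.Int.le_floordiv_iff_mul_le (a := lo + hi) (b := 2) (q := lo) (by omega)).2 h1
    have := (PySem.Int.floordiv_lt_iff_lt_mul (a := lo + hi) (b := 2) (q := hi) (by omega)).2 h2
    omega
  · have h1 : lo * 2 ≤ lo + hi := by omega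
    have h2 : lo + hi < hi * 2 := by omega
    have := (PySem.Int.le_floordiv_iff_mul_le (a := lo + hi) (b := 2) (q := lo) (by omega)).2 h1
    have := (PySem.Int.floordiv_lt_iff_lt_mul (a := lo + hi) (b := 2) (q := hi) (by omega)).2 h2
    omega

def replace_with_ranks_alt (arr : List Int) : List Int :=
  let distinct := PySem.List.sorted (PySem.Set.ofList arr) (fun x => x) false
  arr.foldl (fun out x => out ++ [bsearchLt distinct x 0 (distinct.length : Int) + 1]) []

-- ===== PRECONDITION & SPEC =====
def Spec_replace_with_ranks (arr : List Int) (out : List Int) : Prop := out = replace_with_ranks_alt arr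
instance (arr : List Int) (out : List Int) : Decidable (Spec_replace_with_ranks arr out) := by unfold Spec_replace_with_ranks; infer_instance

-- ===== CLAIM (what is proved, stated in full; the proofs are below) =====
def Claim_equal_replace_with_ranks : Prop := ∀ (arr : List Int), Dom_replace_with_ranks arr → Spec_replace_with_ranks arr (replace_with_ranks arr)

-- ===== LEMMAS AND PROOFS =====

-- the dict-building fold never touches the entry of a key not in the remaining list
lemma get?_rankfold_not_mem (t : List Int) (x : Int) (hx : x ∉ t) :
    ∀ (d : PySem.Dict Int Int) (r : Int),
      ((t.foldl (fun (st : PySem.Dict Int Int × Int) v => (st.1.insert v st.2, st.2 + 1)) (d, r)).1).get? x = d.get? x := by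
  induction t with
  | nil => intro d r; rfl
  | cons v t ih =>
    intro d r
    simp only [List.foldl_cons]
    rw [ih (fun h => hx (List.mem_cons_of_mem _ h))]
    exact PySem.Dict.get?_insert_of_ne d r (fun hxv => hx (by rw [hxv]; exact List.mem_cons_self))

-- A's rank map sends each key to r + its index in the (nodup) build list
lemma getD_rankfold_mem (L : List Int) (hnd : L.Nodup) (x : Int) (hx : x ∈ L) :
    ∀ (d : PySem.Dict Int Int) (r : Int),
      ((L.foldl (fun (st : PySem.Dict Int Int × Int) v => (st.1.insert v st.2, st.2 + 1)) (d, r)).1).getD x 0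
        = r + (L.idxOf x : Int) := by
  induction L with
  | nil => cases hx
  | cons v t ih =>
    intro d r
    simp only [List.foldl_cons]
    by_cases hxv : x = v
    · subst hxv
      have hxt : x ∉ t := (List.nodup_cons.mp hnd).1
      rw [PySem.Dict.getD_eq_get?_getD, get?_rankfold_not_mem t x hxt,
        PySem.Dict.get?_insert_self]
      simp [List.idxOf_cons_self]
    · have hxt : x ∈ t := (List.mem_cons.mp hx).resolve_left hxv
      rw [ih (List.nodup_cons.mp hnd).2 hxt]
      rw [List.idxOf_cons_ne _ (by exact fun h => hxv h.symm)]
      push_cast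
      ring

-- on a strictly increasing list, the index of a member is the count of smaller entries
lemma idxOf_eq_countP (L : List Int) (hp : L.Pairwise (· < ·)) (x : Int) (hx : x ∈ L) :
    L.idxOf x = L.countP (fun y => decide (y < x)) := by
  induction L with
  | nil => cases hx
  | cons a t ih =>
    have ha : ∀ y ∈ t, a < y := fun y hy => (List.pairwise_cons.mp hp).1 y hy
    by_cases hxa : x = a
    · subst hxa
      have : t.countP (fun y => decide (y < x)) = 0 :=
        List.countP_eq_zero.mpr (fun y hy => by simp [not_lt.mpr (le_of_lt (ha y hy))])
      simp [List.idxOf_cons_self, this]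
    · have hxt : x ∈ t := (List.mem_cons.mp hx).resolve_left hxa
      have hax : a < x := ha x hxt
      rw [List.idxOf_cons_ne _ (by exact fun h => hxa h.symm)]
      rw [ih (List.pairwise_cons.mp hp).2 hxt]
      simp [hax]

-- on a nondecreasing list, entry i is < x exactly when i is below the count of entries < x
lemma getElem_lt_iff_lt_countP (L : List Int) (hp : L.Pairwise (· ≤ ·)) (x : Int) :
    ∀ (i : Nat) (h : i < L.length), (L[i] < x ↔ i < L.countP (fun y => decide (y < x))) := by
  induction L with
  | nil => intro i h; cases h
  | cons a t ih =>
    intro i h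
    have ha : ∀ y ∈ t, a ≤ y := fun y hy => (List.pairwise_cons.mp hp).1 y hy
    by_cases hax : a < x
    · cases i with
      | zero => simp [hax]
      | succ j =>
        have hj : j < t.length := by simpa using h
        have := ih (List.pairwise_cons.mp hp).2 j hj
        simp only [List.getElem_cons_succ]
        simp [hax]
        omega
    · have hzero : t.countP (fun y => decide (y < x)) = 0 :=
        List.countP_eq_zero.mpr (fun y hy => by
          simp only [decide_eq_true_eq]
          exact fun hlt => hax (lt_of_le_of_lt (ha y hy) hlt))
      cases i with
      | zero => simp [hax, hzero]
      | succ j =>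
        have hj : j < t.length := by simpa using h
        simp only [List.getElem_cons_succ]
        constructor
        · intro hlt
          exact absurd (lt_of_le_of_lt (ha _ (List.getElem_mem hj)) hlt) hax
        · intro hc
          simp [hax, hzero] at hc
    
-- Source B's binary search computes the count of entries < x on a nondecreasing list
lemma bsearchLt_eq_countP (L : List Int) (hp : L.Pairwise (· ≤ ·)) (x : Int) :
    ∀ (lo hi : Int), 0 ≤ lo → hi ≤ (L.length : Int) →
      lo ≤ (L.countP (fun y => decide (y < x)) : Int) →
      (L.countP (fun y => decide (y < x)) : Int) ≤ hi →
      bsearchLt L x lo hi = (L.countP (fun y => decide (y < x)) : Int) := by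
  intro lo hi
  induction lo, hi using bsearchLt.induct L x with
  | case1 lo hi h mid hlt ih =>
    intro h0 hlen hc1 hc2
    have h1 : lo * 2 ≤ lo + hi := by omega
    have h2 : lo + hi < hi * 2 := by omega
    have hm1 := (PySem.Int.le_floordiv_iff_mul_le (a := lo + hi) (b := 2) (q := lo) (by omega)).2 h1
    have hm2 := (PySem.Int.floordiv_lt_iff_lt_mul (a := lo + hi) (b := 2) (q := hi) (by omega)).2 h2
    have hmid0 : 0 ≤ mid := by simp only [mid] at *; omega
    have hmidlen : mid < (L.length : Int) := by simp only [mid] at *; omega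
    have hmrange : mid.toNat < L.length := by omega
    have hget : PySem.List.pyGetD L mid 0 = L[mid.toNat] :=
      PySem.List.pyGetD_eq_getElem L 0 hmid0 hmidlen
    have hlt' : L[mid.toNat] < x := hget ▸ hlt
    have hmid := (getElem_lt_iff_lt_countP L hp x mid.toNat hmrange).1 hlt'
    rw [bsearchLt]
    simp only [dif_pos h]
    rw [if_pos hlt]
    exact ih (by simp only [mid] at *; omega) hlen (by simp only [mid] at *; omega) hc2
  | case2 lo hi h mid hlt ih =>
    intro h0 hlen hc1 hc2
    have h1 : lo * 2 ≤ lo + hi := by omega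
    have h2 : lo + hi < hi * 2 := by omega
    have hm1 := (PySem.Int.le_floordiv_iff_mul_le (a := lo + hi) (b := 2) (q := lo) (by omega)).2 h1
    have hm2 := (PySem.Int.floordiv_lt_iff_lt_mul (a := lo + hi) (b := 2) (q := hi) (by omega)).2 h2
    have hmid0 : 0 ≤ mid := by simp only [mid] at *; omega
    have hmidlen : mid < (L.length : Int) := by simp only [mid] at *; omega
    have hmrange : mid.toNat < L.length := by omega
    have hget : PySem.List.pyGetD L mid 0 = L[mid.toNat] :=
      PySem.List.pyGetD_eq_getElem L 0 hmid0 hmidlen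
    have hmid : ¬ mid.toNat < L.countP (fun y => decide (y < x)) :=
      fun hc => hlt (hget ▸ (getElem_lt_iff_lt_countP L hp x mid.toNat hmrange).2 hc)
    rw [bsearchLt]
    simp only [dif_pos h]
    rw [if_neg hlt]
    exact ih h0 (by simp only [mid] at *; omega) hc1 (by simp only [mid] at *; omega)
  | case3 lo hi h =>
    intro h0 hlen hc1 hc2
    rw [bsearchLt]
    simp only [dif_neg h]
    omega

-- ===== VERDICT (by name: the statement is the Claim_ definition above) =====
theorem replace_with_ranks_spec : Claim_equal_replace_with_ranks := by
  intro arr _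
  unfold Spec_replace_with_ranks replace_with_ranks replace_with_ranks_alt
  simp only [PySem.List.foldl_append_singleton_eq_map, List.nil_append]
  apply List.map_congr_left
  intro x hx
  set L := PySem.List.sorted (PySem.Set.ofList arr) (fun x => x) false with hL
  have hperm : L.Perm (PySem.Set.ofList arr) := PySem.List.sorted_perm _ _ _
  have hnd : L.Nodup := hperm.nodup_iff.mpr (PySem.Set.nodup_ofList arr)
  have hmem : x ∈ L := by
    rw [PySem.List.mem_sorted]
    exact (PySem.Set.mem_ofList _ _).mpr hx
  have hlt : L.Pairwise (· < ·) := PySem.List.sorted_ofList_pairwise_lt arr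
  have hle : L.Pairwise (· ≤ ·) := hlt.imp le_of_lt
  have hcle : L.countP (fun y => decide (y < x)) ≤ L.length := List.countP_le_length
  rw [getD_rankfold_mem L hnd x hmem, idxOf_eq_countP L hlt x hmem,
    bsearchLt_eq_countP L hle x 0 (L.length : Int) le_rfl le_rfl
      (by positivity) (by exact_mod_cast hcle)]
  ring
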